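-- pv_equiv track=rewrite | github.com/100-hours-a-week/3-team-Tasteam-data-seeder | apps/seeder/services/places_service.py | map_periods_to_weekly
-- ===== SOURCE A (Python) =====
-- from typing import Dict, List, Optional, Tuple
--
-- def map_periods_to_weekly(periods: List[dict]) -> Dict[int, Tuple[Optional[str], Optional[str], bool]]:
--     day_map = {0: 7, 1: 1, 2: 2, 3: 3, 4: 4, 5: 5, 6: 6}
--     by_day: Dict[int, Tuple[str, Optional[str]]] = {}
--     for p in periods:
--         o = p.get("open")
--         c = p.get("close")
--         if not o:
--             continue
--         day = o.get("day")
--         if day is None or day in by_day: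
--             continue
--         open_time = f"{o.get('hour', 0):02d}:{o.get('minute', 0):02d}"
--         close_time = None
--         if c:
--             close_time = f"{c.get('hour', 0):02d}:{c.get('minute', 0):02d}"
--         by_day[day] = (open_time, close_time)
--
--     weekly: Dict[int, Tuple[Optional[str], Optional[str], bool]] = {}
--     for g_day, d_day in day_map.items():
--         if g_day in by_day:
--             weekly[d_day] = (*by_day[g_day], False)
--         else:
--             weekly[d_day] = (None, None, True)
--     return weekly
-- ===== SOURCE B (Python) =====
-- from typing import Dict, List, Optional, Tuple
--
-- def _clock(h, m):
--     return f"{h:02d}:{m:02d}"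
--
-- def _close_of(c):
--     return _clock(c.get("hour", 0), c.get("minute", 0)) if c else None
--
-- def _day_entry(periods, g):
--     # first period whose truthy "open" dict carries day == g, rendered directly
--     for p in periods:
--         o = p.get("open")
--         if o and o.get("day") == g:
--             return (_clock(o.get("hour", 0), o.get("minute", 0)), _close_of(p.get("close")), False)
--     return (None, None, True)
--
-- def map_periods_to_weekly(periods: List[dict]) -> Dict[int, Tuple[Optional[str], Optional[str], bool]]:
--     return {d: _day_entry(periods, g) for g, d in ((0, 7), (1, 1), (2, 2), (3, 3), (4, 4), (5, 5), (6, 6))}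
-- ===== Notes on version B (the rewrite author's own statement) =====
-- stated objective: simpler
-- what changed: B drops A's intermediate by_day index and its two staged loops: a single dict comprehension over the 7 weekdays calls a per-day scanner that returns the rendered (open, close, closed) triple for the first period whose truthy 'open' dict has that day, formatting times via small helpers instead of inline f-strings per field.
import Mathlib
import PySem

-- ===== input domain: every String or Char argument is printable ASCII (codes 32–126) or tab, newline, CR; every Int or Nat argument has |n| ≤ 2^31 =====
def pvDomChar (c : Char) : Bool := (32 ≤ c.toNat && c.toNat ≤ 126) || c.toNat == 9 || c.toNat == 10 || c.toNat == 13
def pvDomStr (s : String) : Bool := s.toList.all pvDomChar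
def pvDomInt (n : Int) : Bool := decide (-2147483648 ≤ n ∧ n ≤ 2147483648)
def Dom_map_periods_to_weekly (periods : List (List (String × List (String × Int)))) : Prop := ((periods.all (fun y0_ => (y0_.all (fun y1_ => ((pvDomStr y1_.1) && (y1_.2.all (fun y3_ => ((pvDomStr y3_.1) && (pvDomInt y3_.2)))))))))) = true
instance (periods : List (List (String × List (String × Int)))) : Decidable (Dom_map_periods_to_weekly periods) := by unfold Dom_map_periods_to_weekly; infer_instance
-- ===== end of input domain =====

-- B replaces A's index-then-look-up staging by one map over the 7 weekdays, each entry
-- produced by a direct first-match scan of periods (objective: simpler decomposition; not faster).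

-- ===== PORT A =====
-- f"{n:02d}" for an int n; exact: equals str(n).zfill(2) for every Int
def pvFmt02 (n : Int) : String := PySem.Str.zfill (PySem.Int.toStr n) 2

-- loop body of A's first 'for p in periods' (building by_day), extracted as a helper
def pvStepA (by_day : PySem.Dict Int (String × Option String))
    (p : List (String × List (String × Int))) : PySem.Dict Int (String × Option String) :=
  let o? := (PySem.Dict.mk p).get? "open"
  let c? := (PySem.Dict.mk p).get? "close"
  match o? with
  | none => by_day
  | some o =>
    if o = [] then by_day
    else
      match (PySem.Dict.mk o).get? "day" with
      | none => by_day
      | some day =>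
        if by_day.contains day then by_day
        else
          let open_time := pvFmt02 ((PySem.Dict.mk o).getD "hour" 0) ++ ":" ++
                           pvFmt02 ((PySem.Dict.mk o).getD "minute" 0)
          let close_time : Option String :=
            match c? with
            | none => none
            | some c =>
              if c = [] then none
              else some (pvFmt02 ((PySem.Dict.mk c).getD "hour" 0) ++ ":" ++
                         pvFmt02 ((PySem.Dict.mk c).getD "minute" 0))
          by_day.insert day (open_time, close_time)

def map_periods_to_weekly (periods : List (List (String × List (String × Int)))) :
    List (Int × Option String × Option String × Bool) :=
  let by_day := periods.foldl pvStepA PySem.Dict.empty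
  -- second loop: for g_day, d_day in day_map.items(); weekly's keys are distinct, list-append is its insertion order
  [((0:Int),(7:Int)),(1,1),(2,2),(3,3),(4,4),(5,5),(6,6)].foldl
    (fun weekly gd =>
      weekly ++ [match by_day.get? gd.1 with
        | some v => (gd.2, some v.1, v.2, false)
        | none => (gd.2, (none : Option String), (none : Option String), true)])
    []

-- ===== PORT B =====
-- _clock(h, m): f"{h:02d}:{m:02d}" (zfill = 02d exactly, sign kept in front)
def pvClock (h m : Int) : String :=
  PySem.Str.zfill (PySem.Int.toStr h) 2 ++ ":" ++ PySem.Str.zfill (PySem.Int.toStr m) 2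

-- _close_of(c): rendered close time if c is a truthy dict, else None
def pvCloseOf (c? : Option (List (String × Int))) : Option String :=
  match c? with
  | some c =>
    if c.isEmpty then none
    else some (pvClock ((List.lookup "hour" c).getD 0) ((List.lookup "minute" c).getD 0))
  | none => none

-- _day_entry(periods, g): first-match scan, returning the finished triple
def pvDayEntry : List (List (String × List (String × Int))) → Int →
    Option String × Option String × Bool
  | [], _ => (none, none, true)
  | p :: rest, g =>
    match List.lookup "open" p with
    | some o =>
      if !o.isEmpty && (List.lookup "day" o == some g) then
        (some (pvClock ((List.lookup "hour" o).getD 0) ((List.lookup "minute" o).getD 0)),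
         pvCloseOf (List.lookup "close" p), false)
      else pvDayEntry rest g
    | none => pvDayEntry rest g

def map_periods_to_weekly_alt (periods : List (List (String × List (String × Int)))) :
    List (Int × Option String × Option String × Bool) :=
  [((0:Int),(7:Int)),(1,1),(2,2),(3,3),(4,4),(5,5),(6,6)].map
    (fun gd => (gd.2, pvDayEntry periods gd.1))

-- ===== PRECONDITION & SPEC =====
def Spec_map_periods_to_weekly (periods : List (List (String × List (String × Int)))) (out : List (Int × Option String × Option String × Bool)) : Prop := out = map_periods_to_weekly_alt periods
instance (periods : List (List (String × List (String × Int)))) (out : List (Int × Option String × Option String × Bool)) : Decidable (Spec_map_periods_to_weekly periods out) := by unfold Spec_map_periods_to_weekly; infer_instance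

-- ===== CLAIM =====
def Claim_equal_map_periods_to_weekly : Prop := ∀ (periods : List (List (String × List (String × Int)))), Dom_map_periods_to_weekly periods → Spec_map_periods_to_weekly periods (map_periods_to_weekly periods)

-- ===== LEMMAS AND PROOFS =====

-- first-match association-list lookup = Python dict lookup on the same pair list
theorem lookup_eq_get? {ν : Type} (l : List (String × ν)) (k : String) :
    List.lookup k l = (PySem.Dict.mk l).get? k := by
  induction l with
  | nil => simp [PySem.Dict.get?]
  | cons p rest ih =>
    rw [List.lookup, PySem.Dict.get?_mk_cons]
    by_cases h : p.1 = k
    · simp [h]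
    · have h1 : (k == p.1) = false := by simp [Ne.symm h]
      have h2 : (p.1 == k) = false := by simp [h]
      simp [h1, h2, ih]

-- forget B's closed flag: the value by_day would hold for this entry
def pvPack (t : Option String × Option String × Bool) : Option (String × Option String) :=
  t.1.map (fun a => (a, t.2.1))

-- pvDayEntry only produces an open triple or the closed sentinel
theorem dayEntry_shape (ps : List (List (String × List (String × Int)))) (g : Int) :
    pvDayEntry ps g = (none, none, true) ∨
      ∃ a b, pvDayEntry ps g = (some a, b, false) := by
  induction ps with
  | nil => left; rfl
  | cons p rest ih =>
    cases ho : List.lookup "open" p with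
    | none => simpa only [pvDayEntry, ho] using ih
    | some o =>
      by_cases h : (!o.isEmpty && (List.lookup "day" o == some g)) = true
      · simp only [pvDayEntry, ho, h, if_true]; right; exact ⟨_, _, rfl⟩
      · simpa only [pvDayEntry, ho, if_neg h] using ih

-- A's by_day lookup at any day g is B's first-match scan, with the flag forgotten.
theorem foldl_stepA_get? (ps : List (List (String × List (String × Int))))
    (d : PySem.Dict Int (String × Option String)) (g : Int) :
    (ps.foldl pvStepA d).get? g =
      if d.contains g = true then d.get? g else pvPack (pvDayEntry ps g) := by
  induction ps generalizing d with
  | nil =>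
    simp only [List.foldl, pvDayEntry, pvPack, Option.map_none]
    split_ifs with h
    · rfl
    · exact (PySem.Dict.get?_eq_none_iff_contains d g).2 (by simpa using h)
  | cons p ps ih =>
    simp only [List.foldl, pvDayEntry] at *
    rw [ih]
    by_cases hol0 : (List.lookup "open" p) = none
    · have ho : (PySem.Dict.mk p).get? "open" = none := by rw [← lookup_eq_get?]; exact hol0
      simp [pvStepA, ho, hol0]
    · obtain ⟨o, hol⟩ := Option.ne_none_iff_exists'.1 hol0
      have ho : (PySem.Dict.mk p).get? "open" = some o := by rw [← lookup_eq_get?]; exact hol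
      by_cases hoe : o = []
      · simp [pvStepA, ho, hol, hoe]
      · have hoi : (!o.isEmpty) = true := by simp [hoe]
        by_cases hd : ((PySem.Dict.mk o).get? "day") = none
        · have hdl : List.lookup "day" o = none := by rw [lookup_eq_get?, hd]
          simp [pvStepA, ho, hol, hd, hdl, hoe]
        · obtain ⟨day, hd⟩ := Option.ne_none_iff_exists'.1 hd
          have hdl : List.lookup "day" o = some day := by rw [lookup_eq_get?, hd]
          by_cases hdg : day = g
          · subst hdg
            by_cases hc : d.contains day = true
            · simp only [pvStepA, ho, hd, hc]
              simp [hoe, hc]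
            · simp only [pvStepA, ho, hd, hc]
              simp only [hoe, Bool.false_eq_true, if_false]
              have hcon : (d.insert day
                  (pvFmt02 ((PySem.Dict.mk o).getD "hour" 0) ++ ":" ++ pvFmt02 ((PySem.Dict.mk o).getD "minute" 0),
                   match (PySem.Dict.mk p).get? "close" with
                   | none => none
                   | some c => if c = [] then none
                       else some (pvFmt02 ((PySem.Dict.mk c).getD "hour" 0) ++ ":" ++ pvFmt02 ((PySem.Dict.mk c).getD "minute" 0)))).contains day = true :=
                PySem.Dict.contains_insert_self _ _ _
              simp only [hcon, if_true, PySem.Dict.get?_insert_self]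
              simp only [hol, hdl, hoi, beq_self_eq_true, Bool.and_self, if_true,
                pvPack, Option.map_some]
              have hgD : ∀ (m : List (String × Int)) (k : String),
                  ((PySem.Dict.mk m).get? k).getD 0 = (List.lookup k m).getD 0 := by
                intro m k; rw [lookup_eq_get?]
              have hcl := lookup_eq_get? p "close"
              rcases hcq : (PySem.Dict.mk p).get? "close" with _ | c <;>
                simp [pvClock, pvFmt02, pvCloseOf, PySem.Dict.getD, hgD, hcl, hcq,
                  List.isEmpty_iff]
          · have hbg : (day == g) = false := by simp [hdg]
            have hpred : (!o.isEmpty && (List.lookup "day" o == some g)) = false := by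
              simp [hdl, hdg]
            simp only [pvStepA, ho, hd, hol, hpred]
            by_cases hc : d.contains day = true
            · simp [hc]
            · simp only [hoe, if_neg (by simp [hc] : ¬ d.contains day = true), if_false]
              rw [PySem.Dict.contains_insert]
              have : (g == day) = false := by simp [Ne.symm hdg]
              simp [this, PySem.Dict.get?_insert_of_ne _ _ (Ne.symm hdg)]

-- ===== VERDICT =====
theorem map_periods_to_weekly_spec : Claim_equal_map_periods_to_weekly := by
  intro periods _
  unfold Spec_map_periods_to_weekly map_periods_to_weekly map_periods_to_weekly_alt
  rw [PySem.List.foldl_append_singleton_eq_map]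
  apply List.map_congr_left
  intro gd _
  rw [foldl_stepA_get?]
  simp only [PySem.Dict.contains_empty, if_false, Bool.false_eq_true]
  rcases dayEntry_shape periods gd.1 with h | ⟨a, b, h⟩ <;> rw [h] <;> rfl
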